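-- pv_equiv track=rewrite | github.com/JuliusSchlumberger/CreatingVisualizations | scripts/utilities/design_choices/pathways_calculate_vertical_distance.py | pathways_calculate_vertical_distance
-- ===== SOURCE A (Python) =====
-- def pathways_calculate_vertical_distance(dict_x, dict_y):
--     # Reverse dict_x to group by x-values
--     x_groups = {}
--     for k, v in dict_x.items():
--         if v not in x_groups:
--             x_groups[v] = [k]
--         else:
--             x_groups[v].append(k)
--
--     total_distance = 0
--
--     # For each group of items that share the same x-value
--     for x, keys in x_groups.items():
--         # Extract measure numbers and corresponding y-values
--         y_values = []
--         for key in keys: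
--             measure = key.split('[')[0]  # Extract measure part
--             if measure in dict_y:
--                 y_values.append(dict_y[measure])
--             else:  # Handle 'current' or other special cases
--                 y_values.append(dict_y.get(measure, 0))
--
--         # Calculate pairwise differences and add to total distance
--         if len(y_values) > 1:
--             for i in range(len(y_values) - 1):
--                 for j in range(i + 1, len(y_values)):
--                     total_distance += abs(y_values[i] - y_values[j])
--
--     return total_distance
-- ===== SOURCE B (Python) =====
-- def _yval(dict_y, k):
--     return dict_y.get(k.split('[')[0], 0)
--
--
-- def pathways_calculate_vertical_distance(dict_x, dict_y):
--     # Group the looked-up y-values directly by shared x-value.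
--     groups = {}
--     for k, v in dict_x.items():
--         groups.setdefault(v, []).append(_yval(dict_y, k))
--
--     total = 0
--     # Pairwise |y_i - y_j| sum per group via sort + prefix sums.
--     for ys in groups.values():
--         ys.sort()
--         prefix = 0
--         for i, y in enumerate(ys):
--             total += i * y - prefix
--             prefix += y
--     return total
-- ===== Notes on version B (the rewrite author's own statement) =====
-- stated objective: faster
-- what changed: Replaces the quadratic nested i<j loop over each group's y-values by sorting each group and accumulating i*y - prefix_sum in one pass, and fuses the y-lookup into the grouping pass.
import Mathlib
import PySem

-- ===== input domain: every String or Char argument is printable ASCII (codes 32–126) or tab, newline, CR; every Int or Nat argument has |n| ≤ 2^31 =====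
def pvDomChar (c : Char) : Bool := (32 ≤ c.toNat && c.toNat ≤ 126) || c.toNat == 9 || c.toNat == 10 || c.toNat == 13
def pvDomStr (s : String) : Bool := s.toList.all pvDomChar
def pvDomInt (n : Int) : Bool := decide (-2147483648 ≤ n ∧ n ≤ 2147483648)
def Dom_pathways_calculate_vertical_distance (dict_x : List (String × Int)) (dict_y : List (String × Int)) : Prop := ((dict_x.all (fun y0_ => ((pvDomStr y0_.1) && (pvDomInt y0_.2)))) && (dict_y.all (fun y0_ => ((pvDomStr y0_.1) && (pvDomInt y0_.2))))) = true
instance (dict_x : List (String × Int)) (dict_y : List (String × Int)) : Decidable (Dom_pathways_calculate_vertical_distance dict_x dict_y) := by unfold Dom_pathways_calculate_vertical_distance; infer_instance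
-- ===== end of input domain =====

-- B replaces A's quadratic nested i<j loop per group by sorting the group and one prefix-sum pass (objective: faster).

-- ===== PORT A =====
def pathways_calculate_vertical_distance (dict_x : List (String × Int)) (dict_y : List (String × Int)) : Int :=
  -- x_groups = {}; for k, v in dict_x.items(): group keys by x-value
  let x_groups : PySem.Dict Int (List String) :=
    dict_x.foldl (fun g kv =>
      if g.contains kv.2 = false then g.insert kv.2 [kv.1]
      else g.modify kv.2 [] (fun ks => ks ++ [kv.1])) PySem.Dict.empty
  -- for x, keys in x_groups.items(): …
  x_groups.items.foldl (fun total_distance p =>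
    -- y_values built key by key; the 'measure in dict_y' branch and the .get branch port identically
    let y_values : List Int :=
      p.2.foldl (fun ys key =>
        let measure := ((PySem.Str.split? key "[").getD []).headD ""
        if (List.lookup measure dict_y).isSome then
          ys ++ [(List.lookup measure dict_y).getD 0]
        else
          ys ++ [(List.lookup measure dict_y).getD 0]) []
    if 1 < y_values.length then
      (PySem.List.pyRange 0 ((y_values.length : Int) - 1) 1).foldl (fun t i =>
        (PySem.List.pyRange (i + 1) (y_values.length : Int) 1).foldl (fun t j =>
          t + |PySem.List.pyGetD y_values i 0 - PySem.List.pyGetD y_values j 0|) t) total_distance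
    else total_distance) 0

-- ===== PORT B =====
-- helper _yval(dict_y, k) = dict_y.get(k.split('[')[0], 0)
def pvF (dict_y : List (String × Int)) (k : String) : Int :=
  (List.lookup (((PySem.Str.split? k "[").getD []).headD "") dict_y).getD 0

def pathways_calculate_vertical_distance_alt (dict_x : List (String × Int)) (dict_y : List (String × Int)) : Int :=
  -- groups.setdefault(v, []).append(_yval(dict_y, k))
  let groups : PySem.Dict Int (List Int) :=
    dict_x.foldl (fun g kv =>
      g.modify kv.2 [] (fun ys => ys ++ [pvF dict_y kv.1])) PySem.Dict.empty
  -- for ys in groups.values(): ys.sort(); one pass threading (total, prefix)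
  groups.values.foldl (fun total ys0 =>
    let ys := PySem.List.sorted ys0 (fun y => y)
    ((PySem.List.enumerate ys 0).foldl
      (fun (st : Int × Int) iy => (st.1 + iy.1 * iy.2 - st.2, st.2 + iy.2)) (total, 0)).1) 0

-- ===== PRECONDITION & SPEC =====
def Spec_pathways_calculate_vertical_distance (dict_x : List (String × Int)) (dict_y : List (String × Int)) (out : Int) : Prop := out = pathways_calculate_vertical_distance_alt dict_x dict_y
instance (dict_x : List (String × Int)) (dict_y : List (String × Int)) (out : Int) : Decidable (Spec_pathways_calculate_vertical_distance dict_x dict_y out) := by unfold Spec_pathways_calculate_vertical_distance; infer_instance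

-- ===== CLAIM (what is proved, stated in full; the proofs are below) =====
def Claim_equal_pathways_calculate_vertical_distance : Prop := ∀ (dict_x : List (String × Int)) (dict_y : List (String × Int)), Dom_pathways_calculate_vertical_distance dict_x dict_y → Spec_pathways_calculate_vertical_distance dict_x dict_y (pathways_calculate_vertical_distance dict_x dict_y)

-- ===== LEMMAS AND PROOFS =====

-- sum of pairwise |·|-differences, head-recursive characterisation of A's nested loop
def pvPairP : List Int → Int
  | [] => 0
  | a :: l => (l.map (fun y => |a - y|)).sum + pvPairP l

-- B's prefix-sum accumulator as a recursion
def pvS : Int → Int → List Int → Int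
  | _, _, [] => 0
  | i, p, a :: l => (i * a - p) + pvS (i + 1) (p + a) l

-- map pvF over every group's value list
def pvMapVal (dict_y : List (String × Int)) (d : PySem.Dict Int (List String)) : PySem.Dict Int (List Int) :=
  PySem.Dict.mk (d.items.map (fun p => (p.1, p.2.map (pvF dict_y))))

theorem pvGet?_mapVal (dict_y : List (String × Int)) (d : PySem.Dict Int (List String)) (k : Int) :
    (pvMapVal dict_y d).get? k = (d.get? k).map (List.map (pvF dict_y)) := by
  simp only [pvMapVal, PySem.Dict.get?, List.find?_map]
  have hp : ((fun p : Int × List Int => p.1 == k) ∘ (fun p : Int × List String => (p.1, List.map (pvF dict_y) p.2)))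
      = (fun p : Int × List String => p.1 == k) := rfl
  rw [hp]
  cases List.find? (fun p : Int × List String => p.1 == k) d.items <;> simp

theorem pvContains_mapVal (dict_y : List (String × Int)) (d : PySem.Dict Int (List String)) (k : Int) :
    (pvMapVal dict_y d).contains k = d.contains k := by
  rw [PySem.Dict.contains_eq_isSome_get?, PySem.Dict.contains_eq_isSome_get?, pvGet?_mapVal]
  cases d.get? k <;> simp

theorem pvGetD_mapVal (dict_y : List (String × Int)) (d : PySem.Dict Int (List String)) (k : Int) :
    (pvMapVal dict_y d).getD k [] = (d.getD k []).map (pvF dict_y) := by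
  rw [PySem.Dict.getD_eq_get?_getD, PySem.Dict.getD_eq_get?_getD, pvGet?_mapVal]
  cases d.get? k <;> simp

theorem pvInsert_mapVal (dict_y : List (String × Int)) (d : PySem.Dict Int (List String)) (v : Int) (val : List String) :
    pvMapVal dict_y (d.insert v val) = (pvMapVal dict_y d).insert v (val.map (pvF dict_y)) := by
  unfold PySem.Dict.insert
  rw [pvContains_mapVal]
  by_cases h : d.contains v = true
  · rw [if_pos h, if_pos h]
    simp only [pvMapVal, List.map_map]
    congr 1
    apply List.map_congr_left
    intro p _
    by_cases hp : p.1 = v <;> simp [hp]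
  · rw [if_neg h, if_neg h]
    simp [pvMapVal]

theorem pvCommute (dict_y : List (String × Int)) (g : PySem.Dict Int (List String)) (v : Int) (k : String) :
    pvMapVal dict_y (g.modify v [] (fun ks => ks ++ [k]))
      = (pvMapVal dict_y g).modify v [] (fun ys => ys ++ [pvF dict_y k]) := by
  unfold PySem.Dict.modify
  rw [pvInsert_mapVal, pvGetD_mapVal, List.map_append]
  rfl

-- A's grouping step (if-not-contains/else) is exactly one dict.modify
theorem pvStepA (g : PySem.Dict Int (List String)) (k : String) (v : Int) :
    (if g.contains v = false then g.insert v [k] else g.modify v [] (fun ks => ks ++ [k]))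
      = g.modify v [] (fun ks => ks ++ [k]) := by
  by_cases h : g.contains v = true
  · simp [h]
  · have h' : g.contains v = false := by simpa using h
    rw [if_pos h']
    unfold PySem.Dict.modify
    rw [PySem.Dict.getD_of_not_contains _ _ h']
    rfl

-- B's grouping dict is A's grouping dict with every value list mapped through pvF
theorem pvGroups_eq (dict_x : List (String × Int)) (dict_y : List (String × Int)) :
    dict_x.foldl (fun g kv => g.modify kv.2 [] (fun ys => ys ++ [pvF dict_y kv.1])) PySem.Dict.empty
      = pvMapVal dict_y (dict_x.foldl (fun g kv => g.modify kv.2 [] (fun ks => ks ++ [kv.1])) PySem.Dict.empty) := by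
  have h : ∀ (l : List (String × Int)) (g : PySem.Dict Int (List String)),
      l.foldl (fun g kv => g.modify kv.2 [] (fun ys => ys ++ [pvF dict_y kv.1])) (pvMapVal dict_y g)
        = pvMapVal dict_y (l.foldl (fun g kv => g.modify kv.2 [] (fun ks => ks ++ [kv.1])) g) := by
    intro l
    induction l with
    | nil => intro g; rfl
    | cons kv l ih =>
      intro g
      simp only [List.foldl_cons]
      rw [← pvCommute, ih]
  have h0 : pvMapVal dict_y PySem.Dict.empty = PySem.Dict.empty := rfl
  have h1 := h dict_x PySem.Dict.empty
  rwa [h0] at h1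

theorem pvValues_mapVal (dict_y : List (String × Int)) (d : PySem.Dict Int (List String)) :
    (pvMapVal dict_y d).values = d.items.map (fun p => p.2.map (pvF dict_y)) := by
  simp [pvMapVal, PySem.Dict.values, List.map_map, Function.comp_def]

-- B's one-pass accumulator computes pvS
theorem pvB1 (zs : List Int) : ∀ (i t p : Int),
    ((PySem.List.enumerate zs i).foldl
      (fun (st : Int × Int) iy => (st.1 + iy.1 * iy.2 - st.2, st.2 + iy.2)) (t, p)).1
      = t + pvS i p zs := by
  induction zs with
  | nil => intro i t p; simp [PySem.List.enumerate_nil, pvS]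
  | cons a l ih =>
    intro i t p
    rw [PySem.List.enumerate_cons]
    simp only [List.foldl_cons]
    rw [ih]
    simp only [pvS]
    ring

theorem pvS_shift (l : List Int) : ∀ (i p : Int),
    pvS i p l = pvS 0 0 l + i * l.sum - p * l.length := by
  induction l with
  | nil => intro i p; simp [pvS]
  | cons a l ih =>
    intro i p
    simp only [pvS, List.sum_cons, List.length_cons]
    rw [ih (i + 1) (p + a), ih (0 + 1) (0 + a)]
    push_cast
    ring

theorem pvSortedS (l : List Int) (h : l.Pairwise (· ≤ ·)) : pvS 0 0 l = pvPairP l := by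
  induction l with
  | nil => rfl
  | cons a l ih =>
    have hle : ∀ y ∈ l, a ≤ y := (List.pairwise_cons.mp h).1
    have h2 := ih ((List.pairwise_cons.mp h).2)
    simp only [pvS, pvPairP]
    rw [pvS_shift l (0 + 1) (0 + a), h2]
    have hm : l.map (fun y => |a - y|) = l.map (fun y => y + (-a)) := by
      apply List.map_congr_left
      intro y hy
      rw [abs_sub_comm, abs_of_nonneg (by have := hle y hy; omega)]
      ring
    rw [hm, PySem.List.sum_map_add_int]
    rw [show (List.map (fun y : Int => y) l) = l from List.map_id' l]
    rw [PySem.List.sum_map_const_int]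
    push_cast
    ring

theorem pvPairP_perm {l l' : List Int} (h : l.Perm l') : pvPairP l = pvPairP l' := by
  induction h with
  | nil => rfl
  | cons x h ih =>
    simp only [pvPairP, ih, (h.map (fun y => |x - y|)).sum_eq]
  | swap x y l =>
    simp only [pvPairP, List.map_cons, List.sum_cons]
    rw [abs_sub_comm y x]
    ring
  | trans _ _ ih1 ih2 => rw [ih1, ih2]

-- the sorted one-pass result equals the pairwise sum of the unsorted group
theorem pvGroupB (ys0 : List Int) :
    pvS 0 0 (PySem.List.sorted ys0 (fun y => y)) = pvPairP ys0 := by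
  rw [pvSortedS _ (PySem.List.sorted_pairwise ys0 (fun y => y)),
    pvPairP_perm (PySem.List.sorted_perm ys0 (fun y => y) false)]

-- closed-sum form of A's outer index loop, by recursion on the list
theorem pvRangeSum : ∀ ys : List Int,
    ((List.range (ys.length - 1)).map
      (fun k => ((ys.drop (k + 1)).map (fun y => |ys.getD k 0 - y|)).sum)).sum = pvPairP ys
  | [] => by simp [pvPairP]
  | [a] => by simp [pvPairP]
  | a :: b :: m => by
    have ih := pvRangeSum (b :: m)
    simp only [List.length_cons, Nat.add_sub_cancel] at ih ⊢
    rw [List.range_succ_eq_map, List.map_cons, List.sum_cons, List.map_map]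
    have htail : (List.range m.length).map
          ((fun k => (((a :: b :: m).drop (k + 1)).map (fun y => |(a :: b :: m).getD k 0 - y|)).sum) ∘ Nat.succ)
        = (List.range m.length).map
          (fun k => (((b :: m).drop (k + 1)).map (fun y => |(b :: m).getD k 0 - y|)).sum) := by
      apply List.map_congr_left
      intro k _
      simp
    rw [htail, ih]
    simp [pvPairP]

-- A's guarded double loop adds pvPairP to the accumulator
theorem pvInnerA (ys : List Int) (t : Int) :
    (if 1 < ys.length then
      (PySem.List.pyRange 0 ((ys.length : Int) - 1) 1).foldl (fun t i =>
        (PySem.List.pyRange (i + 1) (ys.length : Int) 1).foldl (fun t j =>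
          t + |PySem.List.pyGetD ys i 0 - PySem.List.pyGetD ys j 0|) t) t
     else t) = t + pvPairP ys := by
  by_cases h : 1 < ys.length
  · rw [if_pos h]
    have hcong : ∀ (acc : Int), ∀ i ∈ PySem.List.pyRange 0 ((ys.length : Int) - 1) 1,
        (PySem.List.pyRange (i + 1) (ys.length : Int) 1).foldl (fun t j =>
          t + |PySem.List.pyGetD ys i 0 - PySem.List.pyGetD ys j 0|) acc
        = acc + ((ys.drop (i.toNat + 1)).map (fun y => |ys.getD i.toNat 0 - y|)).sum := by
      intro acc i hi
      have h0 : (0:Int) ≤ i ∧ i < (ys.length : Int) - 1 := PySem.List.mem_pyRange_one.mp hi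
      rw [PySem.List.foldl_pyRange_pyGetD' ys 0
        (fun t y => t + |PySem.List.pyGetD ys i 0 - y|) acc (by omega : (0:Int) ≤ i + 1)]
      rw [show ((i : Int) + 1).toNat = i.toNat + 1 by omega]
      rw [PySem.List.pyGetD_of_nonneg ys 0 h0.1]
      rw [PySem.List.foldl_add]
    rw [PySem.List.foldl_congr_mem _ _ _ t hcong]
    rw [PySem.List.foldl_add]
    congr 1
    rw [PySem.List.pyRange_one, List.map_map]
    have h1 : ((ys.length : Int) - 1 - 0).toNat = ys.length - 1 := by omega
    rw [h1]
    have h2 : ∀ k ∈ List.range (ys.length - 1),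
        ((fun i : Int => ((ys.drop (i.toNat + 1)).map (fun y => |ys.getD i.toNat 0 - y|)).sum)
          ∘ (fun k : Nat => (0:Int) + k)) k
        = ((ys.drop (k + 1)).map (fun y => |ys.getD k 0 - y|)).sum := by
      intro k _
      simp
    rw [List.map_congr_left h2]
    exact pvRangeSum ys
  · rw [if_neg h]
    rcases ys with _ | ⟨a, _ | ⟨b, m⟩⟩
    · simp [pvPairP]
    · simp [pvPairP]
    · exact absurd (by simp only [List.length_cons]; omega) h

-- ===== VERDICT (by name: the statement is the Claim_ definition above) =====
theorem pathways_calculate_vertical_distance_spec : Claim_equal_pathways_calculate_vertical_distance := by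
  intro dict_x dict_y _
  unfold Spec_pathways_calculate_vertical_distance
  unfold pathways_calculate_vertical_distance pathways_calculate_vertical_distance_alt
  simp only [pvStepA, ite_self, PySem.List.foldl_append_singleton_eq_map, List.nil_append]
  simp only [show (fun key => (List.lookup (((PySem.Str.split? key "[").getD []).headD "") dict_y).getD 0)
      = pvF dict_y from rfl]
  simp only [pvInnerA]
  rw [pvGroups_eq]
  rw [pvValues_mapVal]
  simp only [pvB1, pvGroupB]
  rw [List.foldl_map]
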